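-- pv_equiv track=rewrite | github.com/zarbo-ian/SentimentAnalisis | funciones.py | ordenar_lista_actividad
-- ===== SOURCE A (Python) =====
-- def insertion_sort(arr):
--         for i in range(1, len(arr)):
--             key = arr[i]
--             j = i - 1
--             while j >= 0 and key < arr[j]:
--                 arr[j + 1] = arr[j]
--                 j -= 1
--             arr[j + 1] = key
--         return arr
--
-- def ordenar_lista_actividad(array):
--     sorted_array = insertion_sort(array)
--     lista_completa = []
--     lista_duplicas = []
--
--     for num in sorted_array:
--         if num in lista_completa:
--             lista_duplicas.append(num)
--         else:
--             lista_completa.append(num)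
--     return lista_completa, lista_duplicas
-- ===== SOURCE B (Python) =====
-- def ordenar_lista_actividad(array):
--     array.sort()  # keep A's in-place sorting of the argument
--     counts = {}
--     for num in array:
--         counts[num] = counts.get(num, 0) + 1
--     lista_completa = list(counts.keys())
--     lista_duplicas = []
--     for value, count in counts.items():
--         lista_duplicas.extend([value] * (count - 1))
--     return lista_completa, lista_duplicas
-- ===== Notes on version B (the rewrite author's own statement) =====
-- stated objective: faster
-- what changed: B replaces A's quadratic insertion sort with the built-in in-place sort and replaces the membership-test scan (num in lista_completa, an inner O(n) search) by a frequency dict built in one pass, from which both the unique list (the keys) and the duplicate list (count-1 copies per key) are generated.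
import Mathlib
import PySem

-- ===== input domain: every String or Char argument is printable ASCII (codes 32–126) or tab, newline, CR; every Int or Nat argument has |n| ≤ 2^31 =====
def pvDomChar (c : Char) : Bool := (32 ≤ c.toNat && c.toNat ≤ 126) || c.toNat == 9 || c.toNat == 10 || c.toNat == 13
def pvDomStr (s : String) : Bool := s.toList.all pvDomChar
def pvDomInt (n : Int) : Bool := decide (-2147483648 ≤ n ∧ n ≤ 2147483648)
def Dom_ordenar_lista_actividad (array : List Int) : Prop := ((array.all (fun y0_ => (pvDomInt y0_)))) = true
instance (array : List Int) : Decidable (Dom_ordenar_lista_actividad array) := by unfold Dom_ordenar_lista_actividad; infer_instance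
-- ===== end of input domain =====

-- B sorts and then builds a frequency dict once, generating the unique and duplicate lists from it
-- (instead of A's insertion sort plus membership-test scan); both Pythons sort the argument in place,
-- the equivalence proved here is about the return value.

-- ===== PORT A =====
-- inner 'while j >= 0 and key < arr[j]' loop of insertion_sort; jn encodes j+1 (jn = 0 is j = -1);
-- indices are always in range in A, so arr[j] is List.getD (exact here) and arr[j+1]=… is List.set
def pvInsertWhile : List Int → Int → Nat → List Int
  | arr, key, 0 => arr.set 0 key
  | arr, key, jn+1 =>
      if key < arr.getD jn 0 then pvInsertWhile (arr.set (jn+1) (arr.getD jn 0)) key jn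
      else arr.set (jn+1) key

def insertion_sort (arr : List Int) : List Int :=
  (PySem.List.pyRange 1 (arr.length : Int) 1).foldl
    (fun a i => pvInsertWhile a (a.getD i.toNat 0) i.toNat) arr

def ordenar_lista_actividad (array : List Int) : List Int × List Int :=
  let sorted_array := insertion_sort array
  sorted_array.foldl
    (fun (p : List Int × List Int) num =>
      if num ∈ p.1 then (p.1, p.2 ++ [num]) else (p.1 ++ [num], p.2))
    ([], [])

-- ===== PORT B =====
def ordenar_lista_actividad_alt (array : List Int) : List Int × List Int :=
  let s := PySem.List.sorted array (fun x => x)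
  let counts := s.foldl (fun d x => d.insert x (d.getD x 0 + 1)) (PySem.Dict.empty : PySem.Dict Int Int)
  let lista_completa := counts.keys
  let lista_duplicas := counts.items.foldl
    (fun (acc : List Int) p => acc ++ List.replicate (p.2 - 1).toNat p.1) []
  (lista_completa, lista_duplicas)

-- ===== PRECONDITION & SPEC =====
def Spec_ordenar_lista_actividad (array : List Int) (out : List Int × List Int) : Prop := out = ordenar_lista_actividad_alt array
instance (array : List Int) (out : List Int × List Int) : Decidable (Spec_ordenar_lista_actividad array out) := by unfold Spec_ordenar_lista_actividad; infer_instance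

-- ===== CLAIM (what is proved, stated in full; the proofs are below) =====
def Claim_equal_ordenar_lista_actividad : Prop := ∀ (array : List Int), Dom_ordenar_lista_actividad array → Spec_ordenar_lista_actividad array (ordenar_lista_actividad array)

-- ===== LEMMAS AND PROOFS =====

-- inserting 'key' with Python's shifting loop into a sorted prefix is PySem's insertBy on (<)
theorem pvInsertBy_append_singleton_lt (key b : Int) (q : List Int) (h : key < b) :
    PySem.List.insertBy (fun a b => decide (a < b)) key (q ++ [b])
      = PySem.List.insertBy (fun a b => decide (a < b)) key q ++ [b] := by
  induction q with
  | nil => simp [PySem.List.insertBy, h]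
  | cons y ys ih =>
      simp only [List.cons_append, PySem.List.insertBy]
      by_cases hy : key < y
      · simp [hy]
      · simp [hy, ih]

theorem pvInsertWhile_spec (p : List Int) (key : Int) : ∀ (x : Int) (rest : List Int),
    p.Pairwise (· ≤ ·) →
    pvInsertWhile (p ++ x :: rest) key p.length
      = PySem.List.insertBy (fun a b => decide (a < b)) key p ++ rest := by
  induction p using List.reverseRecOn with
  | nil => intro x rest _; simp [pvInsertWhile, PySem.List.insertBy]
  | append_singleton q b ih =>
      intro x rest hp
      have hq : q.Pairwise (· ≤ ·) := (List.pairwise_append.mp hp).1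
      have hqb : ∀ y ∈ q, y ≤ b := by
        intro y hy; exact (List.pairwise_append.mp hp).2.2 y hy b (by simp)
      have hlen : (q ++ [b]).length = q.length + 1 := by simp
      rw [hlen]
      have hget : ((q ++ [b]) ++ x :: rest).getD q.length 0 = b := by
        simp [List.getD]
      rw [pvInsertWhile, hget]
      by_cases hkb : key < b
      · rw [if_pos hkb]
        have hset : ((q ++ [b]) ++ x :: rest).set (q.length+1) b = q ++ b :: b :: rest := by
          rw [List.set_append]; simp
        rw [hset]
        have := ih b (b :: rest) hq
        rw [this, pvInsertBy_append_singleton_lt key b q hkb]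
        simp
      · rw [if_neg hkb]
        have hall : ∀ y ∈ q ++ [b], (decide (key < y)) = false := by
          intro y hy
          simp only [List.mem_append, List.mem_singleton] at hy
          have : y ≤ b := by rcases hy with hy | rfl; exact hqb y hy; rfl
          simp only [decide_eq_false_iff_not, not_lt]; omega
        rw [PySem.List.insertBy_of_forall_not_before _ _ _ hall]
        rw [List.set_append]; simp

-- outer loop invariant: after processing indices [done.length, done.length+todo.length),
-- the list is sorted(done ++ todo)
theorem pvOuter (todo : List Int) : ∀ (done : List Int), done ≠ [] →
    (PySem.List.pyRange (done.length : Int) ((done.length : Int) + todo.length) 1).foldl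
      (fun a i => pvInsertWhile a (a.getD i.toNat 0) i.toNat)
      (PySem.List.sorted done (fun x => x) ++ todo)
      = PySem.List.sorted (done ++ todo) (fun x => x) := by
  induction todo with
  | nil =>
      intro done _
      rw [PySem.List.pyRange_one_eq_nil (by simp)]
      simp
  | cons t ts ih =>
      intro done hne
      have hlt : (done.length : Int) < (done.length : Int) + (t :: ts).length := by
        simp
      rw [PySem.List.pyRange_one_cons hlt, List.foldl_cons]
      have hslen : (PySem.List.sorted done (fun x => x)).length = done.length :=
        PySem.List.length_sorted done _ false
      have h1 : ((done.length : Int)).toNat = (PySem.List.sorted done (fun x => x)).length := by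
        rw [hslen]; simp
      have hget : ((PySem.List.sorted done (fun x => x) ++ t :: ts).getD
          ((done.length : Int)).toNat 0) = t := by
        rw [h1]; simp [List.getD]
      have hbody : pvInsertWhile (PySem.List.sorted done (fun x => x) ++ t :: ts)
            ((PySem.List.sorted done (fun x => x) ++ t :: ts).getD ((done.length : Int)).toNat 0)
            ((done.length : Int)).toNat
          = PySem.List.sorted (done ++ [t]) (fun x => x) ++ ts := by
        rw [hget]
        rw [h1, pvInsertWhile_spec _ _ _ _ (by simpa using PySem.List.sorted_pairwise done (fun x => x))]
        have : PySem.List.sorted (done ++ [t]) (fun x => x)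
            = PySem.List.insertBy (fun a b => decide (a < b)) t (PySem.List.sorted done (fun x => x)) := by
          rw [PySem.List.sorted_eq_foldl_insertBy, PySem.List.sorted_eq_foldl_insertBy, List.foldl_append]
          simp
        rw [this]
      simp only [hbody]
      have := ih (done ++ [t]) (by simp)
      have harith : ((done.length : Int)) + ((t :: ts).length : Int)
          = ((done ++ [t]).length : Int) + (ts.length : Int) := by simp only [List.length_cons, List.length_append, List.length_nil]; push_cast; ring
      have hlist : done ++ t :: ts = (done ++ [t]) ++ ts := by simp
      rw [harith, hlist]
      simpa using this

theorem insertion_sort_eq_sorted (arr : List Int) :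
    insertion_sort arr = PySem.List.sorted arr (fun x => x) := by
  cases arr with
  | nil => rfl
  | cons h t =>
      have hs1 : PySem.List.sorted [h] (fun x => x) = [h] := rfl
      have := pvOuter t [h] (by simp)
      rw [hs1] at this
      have hr : (([h].length : Int)) = 1 := by simp
      rw [hr] at this
      unfold insertion_sort
      simp only [List.length_cons] at this ⊢
      have harith : (((t.length + 1 : Nat)) : Int) = 1 + (t.length : Int) := by push_cast; ring
      rw [harith]
      simpa using this

-- a sorted list's first occurrences are strictly increasing
theorem pvOfList_pairwise_lt (l : List Int) (h : l.Pairwise (· ≤ ·)) :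
    (PySem.Set.ofList l).Pairwise (· < ·) := by
  induction l using List.reverseRecOn with
  | nil => simp [PySem.Set.ofList]
  | append_singleton u v ih =>
      have hu : u.Pairwise (· ≤ ·) := (List.pairwise_append.mp h).1
      have hub : ∀ y ∈ u, y ≤ v := fun y hy => (List.pairwise_append.mp h).2.2 y hy v (by simp)
      rw [PySem.Set.ofList_append_singleton]
      by_cases hv : v ∈ PySem.Set.ofList u
      · rw [PySem.Set.add_of_mem hv]; exact ih hu
      · rw [PySem.Set.add_of_not_mem hv]
        rw [List.pairwise_append]
        refine ⟨ih hu, by simp, ?_⟩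
        intro a ha b hb
        simp only [List.mem_singleton] at hb; subst hb
        have hau : a ∈ u := (PySem.Set.mem_ofList u a).mp ha
        have : a ≤ b := hub a hau
        have hne : a ≠ b := fun he => hv (he ▸ ha)
        omega

-- in a strictly increasing list, an upper bound that is a member is the last element
theorem pvLast_key (l : List Int) (v : Int) (hlt : l.Pairwise (· < ·)) (hv : v ∈ l)
    (hub : ∀ y ∈ l, y ≤ v) : ∃ q, l = q ++ [v] ∧ v ∉ q := by
  have hne : l ≠ [] := by rintro rfl; simp at hv
  obtain ⟨q, b, rfl⟩ := (by exact ⟨l.dropLast, l.getLast hne, (List.dropLast_append_getLast hne).symm⟩ : ∃ q b, l = q ++ [b])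
  have hqb : ∀ y ∈ q, y < b := fun y hy => (List.pairwise_append.mp hlt).2.2 y hy b (by simp)
  have hbv : b ≤ v := hub b (by simp)
  have hvb : v = b := by
    rcases List.mem_append.mp hv with hq | hb
    · have := hqb v hq; omega
    · simpa using hb
  subst hvb
  exact ⟨q, rfl, fun hq => by have := hqb v hq; omega⟩

-- A's membership split of a sorted list = (distinct values, count-1 copies of each value)
theorem pvSplit_main (s : List Int) (hs : s.Pairwise (· ≤ ·)) :
    s.foldl
      (fun (p : List Int × List Int) num =>
        if num ∈ p.1 then (p.1, p.2 ++ [num]) else (p.1 ++ [num], p.2))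
      ([], [])
      = (PySem.Set.ofList s,
         (PySem.Set.ofList s).flatMap
           (fun k => List.replicate (((s.count k : Int)) - 1).toNat k)) := by
  induction s using List.reverseRecOn with
  | nil => rfl
  | append_singleton u v ih =>
      have hu : u.Pairwise (· ≤ ·) := (List.pairwise_append.mp hs).1
      have hub : ∀ y ∈ u, y ≤ v := fun y hy => (List.pairwise_append.mp hs).2.2 y hy v (by simp)
      rw [List.foldl_append, ih hu]
      rw [PySem.Set.ofList_append_singleton]
      simp only [List.foldl_cons, List.foldl_nil]
      by_cases hv : v ∈ u
      · -- v already seen: A appends it to the duplicates; on the B side the count of the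
        -- last key (= v, by sortedness) grows by one
        have hv' : v ∈ PySem.Set.ofList u := (PySem.Set.mem_ofList u v).mpr hv
        rw [if_pos hv', PySem.Set.add_of_mem hv']
        obtain ⟨q, hq, hvq⟩ := pvLast_key (PySem.Set.ofList u) v (pvOfList_pairwise_lt u hu) hv'
          (fun y hy => hub y ((PySem.Set.mem_ofList u y).mp hy))
        have h1 : ∀ k ∈ q, (List.replicate ((((u ++ [v]).count k : Int)) - 1).toNat k)
            = (List.replicate (((u.count k : Int)) - 1).toNat k) := by
          intro k hk
          have hne : k ≠ v := fun he => hvq (he ▸ hk)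
          simp [List.count_append, Ne.symm hne]
        have hcv1 : 1 ≤ u.count v := List.one_le_count_iff.mpr hv
        rw [Prod.mk.injEq]
        refine ⟨rfl, ?_⟩
        rw [hq, List.flatMap_append, List.flatMap_append]
        simp only [List.flatMap_singleton]
        rw [List.flatMap_congr h1]
        have hrep : List.replicate ((((u ++ [v]).count v : Int)) - 1).toNat v
            = List.replicate (((u.count v : Int)) - 1).toNat v ++ [v] := by
          have hc : (u ++ [v]).count v = u.count v + 1 := by simp [List.count_append]
          rw [hc]
          have e1 : (((u.count v + 1 : Nat) : Int) - 1).toNat = u.count v := by omega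
          have e2 : (((u.count v : Nat) : Int) - 1).toNat = u.count v - 1 := by omega
          rw [e1, e2]
          have : u.count v = (u.count v - 1) + 1 := by omega
          conv_lhs => rw [this]
          rw [List.replicate_succ']
        rw [hrep, List.append_assoc]
      · have hv' : v ∉ PySem.Set.ofList u := fun h => hv ((PySem.Set.mem_ofList u v).mp h)
        rw [if_neg hv', PySem.Set.add_of_not_mem hv']
        rw [Prod.mk.injEq]
        refine ⟨rfl, ?_⟩
        rw [List.flatMap_append]
        simp only [List.flatMap_singleton]
        have h1 : ∀ k ∈ PySem.Set.ofList u, (List.replicate ((((u ++ [v]).count k : Int)) - 1).toNat k)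
            = (List.replicate (((u.count k : Int)) - 1).toNat k) := by
          intro k hk
          have hne : k ≠ v := fun he => hv (he ▸ ((PySem.Set.mem_ofList u k).mp hk))
          simp [List.count_append, Ne.symm hne]
        rw [List.flatMap_congr h1]
        have hcv : List.replicate ((((u ++ [v]).count v : Int)) - 1).toNat v = [] := by
          have : (u ++ [v]).count v = 1 := by
            simp [List.count_append, List.count_eq_zero_of_not_mem hv]
          rw [this]; simp
        rw [hcv, List.append_nil]

-- B's port unfolded: keys and items of the counter over the sorted list
theorem pvAlt_eq (array : List Int) :
    ordenar_lista_actividad_alt array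
      = (PySem.Set.ofList (PySem.List.sorted array (fun x => x)),
         (PySem.Set.ofList (PySem.List.sorted array (fun x => x))).flatMap
           (fun k => List.replicate ((((PySem.List.sorted array (fun x => x)).count k : Int)) - 1).toNat k)) := by
  simp only [ordenar_lista_actividad_alt]
  rw [PySem.Dict.foldl_insert_getD_add_one_eq_counter]
  rw [PySem.Dict.keys_counter, PySem.Dict.items_counter]
  rw [List.foldl_map, PySem.List.foldl_append_eq_flatMap]
  simp

-- ===== VERDICT (by name: the statement is the Claim_ definition above) =====
theorem ordenar_lista_actividad_spec : Claim_equal_ordenar_lista_actividad := by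
  intro array _
  show _ = _
  rw [ordenar_lista_actividad, insertion_sort_eq_sorted, pvAlt_eq]
  exact pvSplit_main _ (by simpa using PySem.List.sorted_pairwise array (fun x => x))
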